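-- pv_equiv track=rewrite | github.com/SangMin-Code/python | baekjoon/1920.py | my2
-- ===== SOURCE A (Python) =====
-- from typing import List
--
-- def my2(list_a:List[int],list_b:List[int])->List[int]:
--     list_a.sort()
--     answer = [0]*len(list_b)
--
--     def binary_serach(start,end,num):
--         if start <= end:
--             mid = start + (end-start)//2
--             if list_a[mid]==num:
--                 return 1
--             elif list_a[mid]<num:
--                 return binary_serach(mid+1,end,num)
--             else :
--                 return binary_serach(start,mid-1,num)
--         else :
--             return 0
--
--     for i in range(len(list_b)):
--         answer[i] = binary_serach(0,len(list_a)-1,list_b[i])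
--
--     return answer
-- ===== SOURCE B (Python) =====
-- def my2(list_a, list_b):
--     list_a.sort()  # kept for the in-place mutation A performs
--     present = set(list_a)
--     return [1 if b in present else 0 for b in list_b]
-- ===== Notes on version B (the rewrite author's own statement) =====
-- stated objective: faster
-- what changed: Replaces the per-query recursive binary search with a hash set built once from the (still in-place sorted) list, answering every query by an O(1) set membership test in a comprehension.
import Mathlib
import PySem

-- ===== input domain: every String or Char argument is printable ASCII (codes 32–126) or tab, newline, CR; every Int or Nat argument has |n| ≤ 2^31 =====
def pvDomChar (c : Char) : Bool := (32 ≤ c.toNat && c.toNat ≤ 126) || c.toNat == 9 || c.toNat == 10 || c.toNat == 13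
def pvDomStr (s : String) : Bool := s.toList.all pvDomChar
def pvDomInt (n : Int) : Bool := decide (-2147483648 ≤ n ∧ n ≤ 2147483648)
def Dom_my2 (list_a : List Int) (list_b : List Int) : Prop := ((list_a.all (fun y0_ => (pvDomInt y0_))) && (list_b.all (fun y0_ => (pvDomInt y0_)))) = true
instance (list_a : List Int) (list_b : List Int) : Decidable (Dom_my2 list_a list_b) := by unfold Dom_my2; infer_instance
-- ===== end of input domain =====

-- B replaces A's per-query recursive binary search by a set built once, answering each
-- query by a membership test (objective: faster). Both A and B sort list_a in place
-- (the same mutation); the equivalence proved here is about the return value.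

-- ===== PORT A =====
-- A's inner recursive `binary_serach` over the sorted list `la`.
-- Indexing uses pyGetD: for every call A actually makes, start/end stay inside
-- [0, len-1] so `list_a[mid]` never raises; the default 0 is unreachable there.
def my2Search (la : List Int) (start e num : Int) : Int :=
  if h : start ≤ e then
    let mid := start + PySem.Int.floordiv (e - start) 2
    let v := PySem.List.pyGetD la mid 0
    if v = num then 1
    else if v < num then my2Search la (mid + 1) e num
    else my2Search la start (mid - 1) num
  else 0
termination_by (e - start + 1).toNat
decreasing_by
  · have h2 := PySem.Int.floordiv_eq_ediv_of_pos (a := e - start) (b := 2) (by omega)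
    omega
  · have h2 := PySem.Int.floordiv_eq_ediv_of_pos (a := e - start) (b := 2) (by omega)
    omega

def my2 (list_a : List Int) (list_b : List Int) : List Int :=
  let la := PySem.List.sorted list_a (fun x => x) false
  let answer := List.replicate list_b.length (0 : Int)
  (PySem.List.pyRange 0 list_b.length 1).foldl
    (fun ans i =>
      PySem.List.pySetD ans i
        (my2Search la 0 ((la.length : Int) - 1) (PySem.List.pyGetD list_b i 0)))
    answer

-- ===== PORT B =====
def my2_alt (list_a : List Int) (list_b : List Int) : List Int :=
  let la := PySem.List.sorted list_a (fun x => x) false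
  let present := PySem.Set.ofList la
  list_b.map (fun b => if PySem.Set.contains present b then (1 : Int) else 0)

-- ===== PRECONDITION & SPEC =====
def Spec_my2 (list_a : List Int) (list_b : List Int) (out : List Int) : Prop := out = my2_alt list_a list_b
instance (list_a : List Int) (list_b : List Int) (out : List Int) : Decidable (Spec_my2 list_a list_b out) := by unfold Spec_my2; infer_instance

-- ===== CLAIM (what is proved, stated in full; the proofs are below) =====
def Claim_equal_my2 : Prop := ∀ (list_a : List Int) (list_b : List Int), Dom_my2 list_a list_b → Spec_my2 list_a list_b (my2 list_a list_b)

-- ===== LEMMAS AND PROOFS =====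

-- On a ≤-sorted list, A's recursive binary search decides membership: provided every
-- index left of `start` holds an element < num and every index right of `e` holds one
-- > num, it returns 1 iff num ∈ la.
theorem my2Search_spec (la : List Int) (hs : la.Pairwise (· ≤ ·)) :
    ∀ (fuel : Nat) (start e num : Int), (e - start + 1).toNat ≤ fuel →
      0 ≤ start → e < (la.length : Int) →
      (∀ (j : Nat) (hj : j < la.length), (j : Int) < start → la[j] < num) →
      (∀ (j : Nat) (hj : j < la.length), e < (j : Int) → num < la[j]) →
      my2Search la start e num = if num ∈ la then 1 else 0 := by
  intro fuel
  induction fuel with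
  | zero =>
    intro start e num hfuel h0 he hl hr
    rw [my2Search]
    have hse : ¬ start ≤ e := by omega
    simp only [hse, dite_false]
    have hnm : num ∉ la := by
      intro hmem
      obtain ⟨j, hj, hje⟩ := List.mem_iff_getElem.mp hmem
      by_cases hc : (j : Int) < start
      · exact absurd hje (by have := hl j hj hc; omega)
      · exact absurd hje (by have := hr j hj (by omega); omega)
    simp [hnm]
  | succ n ih =>
    intro start e num hfuel h0 he hl hr
    rw [my2Search]
    by_cases hse : start ≤ e
    · simp only [hse, dite_true]
      have hfd := PySem.Int.floordiv_eq_ediv_of_pos (a := e - start) (b := 2) (by omega)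
      set mid := start + PySem.Int.floordiv (e - start) 2 with hmid
      have hmid2 : mid = start + (e - start) / 2 := by rw [hmid, hfd]
      have hmb : start ≤ mid ∧ mid ≤ e := by omega
      have hmlt : mid.toNat < la.length := by omega
      have hv : PySem.List.pyGetD la mid 0 = la[mid.toNat] :=
        PySem.List.pyGetD_eq_getElem la (i := mid) 0 (by omega) (by omega)
      have hmono : ∀ (p q : Nat) (hq : q < la.length) (hpq : p ≤ q),
          la[p]'(Nat.lt_of_le_of_lt hpq hq) ≤ la[q] := by
        intro p q hq hpq
        rcases Nat.lt_or_ge p q with hlt | hge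
        · exact (List.pairwise_iff_getElem.mp hs) p q (by omega) hq hlt
        · have : p = q := by omega
          subst this; exact le_refl _
      rw [hv]
      by_cases heq : la[mid.toNat] = num
      · simp only [heq, if_true]
        have : num ∈ la := heq ▸ List.getElem_mem hmlt
        simp [this]
      · simp only [heq, if_false]
        by_cases hlt : la[mid.toNat] < num
        · simp only [hlt, if_true]
          apply ih (mid + 1) e num (by omega) (by omega) he
          · intro j hj hjm
            calc la[j] ≤ la[mid.toNat] := hmono j mid.toNat hmlt (by omega)
              _ < num := hlt
          · exact hr
        · simp only [hlt, if_false]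
          apply ih start (mid - 1) num (by omega) h0 (by omega) hl
          intro j hj hje
          calc num < la[mid.toNat] := by omega
            _ ≤ la[j] := hmono mid.toNat j hj (by omega)
    · simp only [hse, dite_false]
      have hnm : num ∉ la := by
        intro hmem
        obtain ⟨j, hj, hje⟩ := List.mem_iff_getElem.mp hmem
        by_cases hc : (j : Int) < start
        · exact absurd hje (by have := hl j hj hc; omega)
        · exact absurd hje (by have := hr j hj (by omega); omega)
      simp [hnm]

-- A's index-assignment loop over range(len(list_b)) on the [0]*len(list_b) list
-- computes f at every index, i.e. a map over List.range.
theorem foldl_pySetD_range (f : Int → Int) :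
    ∀ (n : Nat) (acc : List Int), n ≤ acc.length →
      (PySem.List.pyRange 0 (n : Int) 1).foldl
          (fun ans i => PySem.List.pySetD ans i (f i)) acc
        = List.map (fun k : Nat => f (k : Int)) (List.range n) ++ acc.drop n := by
  intro n
  induction n with
  | zero => intro acc _; simp [PySem.List.pyRange_one_eq_nil]
  | succ m ih =>
    intro acc hlen
    have hsplit : PySem.List.pyRange 0 ((m + 1 : Nat) : Int) 1
        = PySem.List.pyRange 0 (m : Int) 1 ++ [(m : Int)] := by
      have := PySem.List.pyRange_one_succ_right (a := 0) (b := (m : Int)) (by positivity)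
      simpa [Nat.cast_add, Nat.cast_one] using this
    rw [hsplit, List.foldl_append, ih acc (by omega)]
    simp only [List.foldl_cons, List.foldl_nil]
    rw [PySem.List.pySetD_natCast]
    have hlm : m < acc.length := by omega
    have hdrop : acc.drop m = acc[m] :: acc.drop (m + 1) := List.drop_eq_getElem_cons hlm
    rw [hdrop, List.range_succ, List.map_append]
    rw [List.set_append_right _ _ (by simp)]
    simp only [List.length_map, List.length_range, Nat.sub_self]
    rw [List.set_cons_zero]
    simp

-- Map over range-of-indices of list_b equals a direct map over list_b.
theorem map_range_getElem (xs : List Int) (g : Int → Int) :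
    List.map (fun k : Nat => g (PySem.List.pyGetD xs (k : Int) 0)) (List.range xs.length)
      = xs.map g := by
  apply List.ext_getElem
  · simp
  · intro i h1 h2
    simp only [List.getElem_map, List.getElem_range]
    have hi : i < xs.length := by simpa using h1
    rw [PySem.List.pyGetD_eq_getElem xs (i := (i : Int)) 0 (by omega) (by exact_mod_cast hi)]
    simp

-- ===== VERDICT (by name: the statement is the Claim_ definition above) =====
theorem my2_spec : Claim_equal_my2 := by
  intro list_a list_b _
  unfold Spec_my2 my2 my2_alt
  set la := PySem.List.sorted list_a (fun x => x) false with hla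
  have hs : la.Pairwise (· ≤ ·) := PySem.List.sorted_pairwise list_a (fun x => x)
  rw [foldl_pySetD_range _ list_b.length _ (by simp)]
  rw [show (List.replicate list_b.length (0 : Int)).drop list_b.length = [] from by simp]
  rw [List.append_nil]
  have hsearch : ∀ num : Int,
      my2Search la 0 ((la.length : Int) - 1) num = if num ∈ la then 1 else 0 := by
    intro num
    apply my2Search_spec la hs ((la.length : Int) - 0 + 1 - 1).toNat 0 _ num
    · omega
    · omega
    · omega
    · intro j hj hjl; omega
    · intro j hj hje; omega
  have hmem : ∀ b : Int,
      (if PySem.Set.contains (PySem.Set.ofList la) b then (1 : Int) else 0)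
        = if b ∈ la then 1 else 0 := by
    intro b
    by_cases hb : b ∈ la
    · simp [PySem.Set.mem_ofList, hb]
    · simp [PySem.Set.mem_ofList, hb]
  calc List.map
        (fun k : Nat => my2Search la 0 ((la.length : Int) - 1) (PySem.List.pyGetD list_b (k : Int) 0))
        (List.range list_b.length)
      = List.map
        (fun k : Nat => if (PySem.List.pyGetD list_b (k : Int) 0) ∈ la then (1 : Int) else 0)
        (List.range list_b.length) := by
        simp only [hsearch]
    _ = list_b.map (fun b => if b ∈ la then 1 else 0) := by
        exact map_range_getElem list_b (fun b => if b ∈ la then 1 else 0)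
    _ = list_b.map (fun b => if PySem.Set.contains (PySem.Set.ofList la) b then 1 else 0) := by
        simp only [hmem]
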